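-- pv_equiv track=rewrite | github.com/smarttargettech/active-directory | packaging/ucslint/univention/ucslint/base.py | _split_field
-- ===== SOURCE A (Python) =====
-- from typing import Iterator
--
-- def _split_field(s: str) -> Iterator[str]:
--     """Split control field into parts. Returns generator."""
--     for con in s.split(','):
--         con = con.strip()
--         for dis in con.split('|'):
--             i = dis.find('(')
--             if i >= 0:
--                 dis = dis[:i]
--
--             pkg = dis.strip()
--             if pkg:
--                 yield pkg
-- ===== SOURCE B (Python) =====
-- from typing import Iterator
--
-- def _split_field(s: str) -> Iterator[str]:
--     """Split control field into parts. Returns generator.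
--
--     Single-pass state machine: scan characters once; a comma or pipe ends the
--     current token, an opening parenthesis freezes it (the rest of the token
--     is ignored), and each finished token is stripped and yielded if non-empty.
--     """
--     tok = []
--     skip = False
--     for ch in s:
--         if ch in ',|':
--             pkg = ''.join(tok).strip()
--             if pkg:
--                 yield pkg
--             tok = []
--             skip = False
--         elif ch == '(':
--             skip = True
--         elif not skip:
--             tok.append(ch)
--     pkg = ''.join(tok).strip()
--     if pkg:
--         yield pkg
-- ===== Notes on version B (the rewrite author's own statement) =====
-- stated objective: alternative
-- what changed: Replaced the two nested str.split passes plus per-piece find/slice/strip with a single character-by-character state machine (a token buffer plus a skip flag set at an opening parenthesis) that emits each stripped non-empty token when a delimiter ends it.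
import Mathlib
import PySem

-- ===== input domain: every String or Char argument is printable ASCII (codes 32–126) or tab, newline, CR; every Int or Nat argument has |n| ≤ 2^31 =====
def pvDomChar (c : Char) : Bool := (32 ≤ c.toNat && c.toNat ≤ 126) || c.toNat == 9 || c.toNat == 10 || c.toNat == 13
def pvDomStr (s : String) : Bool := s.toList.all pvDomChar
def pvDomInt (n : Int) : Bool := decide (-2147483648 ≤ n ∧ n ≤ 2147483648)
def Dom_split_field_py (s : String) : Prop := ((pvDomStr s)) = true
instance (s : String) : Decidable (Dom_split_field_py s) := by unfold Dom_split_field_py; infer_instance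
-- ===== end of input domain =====

-- B replaces A's nested split(',') / split('|') passes with per-piece find/slice/strip
-- by a single character-level state machine; equal return values, proved below.

-- ===== PORT A =====
def split_field_py (s : String) : List String :=
  ((PySem.Str.split? s ",").getD []).foldl (fun acc con =>
    let con := PySem.Str.strip con
    ((PySem.Str.split? con "|").getD []).foldl (fun acc dis =>
      let i := PySem.Str.find dis "("
      let dis := if 0 ≤ i then PySem.Str.slice dis none (some i) else dis
      let pkg := PySem.Str.strip dis
      if pkg ≠ "" then acc ++ [pkg] else acc) acc) []

-- ===== PORT B =====
-- flush: ''.join(tok).strip(); yield if non-empty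
def pvFlush (out : List String) (tok : List Char) : List String :=
  let pkg := PySem.Chars.strip tok
  if pkg ≠ [] then out ++ [String.ofList pkg] else out

-- one loop iteration of B's state machine (out, tok, skip)
def pvStep (st : List String × List Char × Bool) (ch : Char) :
    List String × List Char × Bool :=
  if ch = ',' ∨ ch = '|' then (pvFlush st.1 st.2.1, [], false)
  else if ch = '(' then (st.1, st.2.1, true)
  else if st.2.2 then st
  else (st.1, st.2.1 ++ [ch], st.2.2)

def split_field_py_alt (s : String) : List String :=
  let st := s.toList.foldl pvStep ([], [], false)
  pvFlush st.1 st.2.1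

-- ===== PRECONDITION & SPEC =====
def Spec_split_field_py (s : String) (out : List String) : Prop := out = split_field_py_alt s
instance (s : String) (out : List String) : Decidable (Spec_split_field_py s out) := by unfold Spec_split_field_py; infer_instance

-- ===== CLAIM (what is proved, stated in full; the proofs are below) =====
def Claim_equal_split_field_py : Prop := ∀ (s : String), Dom_split_field_py s → Spec_split_field_py s (split_field_py s)

-- ===== LEMMAS AND PROOFS =====

def splitAux (d : Char) : List Char → List Char → List (List Char)
  | [], cur => [cur.reverse]
  | c :: t, cur => if c = d then cur.reverse :: splitAux d t [] else splitAux d t (c :: cur)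

theorem splitOn_go_eq (d : Char) (fuel : Nat) (l cur : List Char) (acc : List (List Char))
    (h : l.length ≤ fuel) :
    PySem.Chars.splitOn.go [d] fuel l cur acc = acc.reverse ++ splitAux d l cur := by
  induction fuel generalizing l cur acc with
  | zero =>
    have : l = [] := by cases l <;> simp_all
    subst this
    simp [PySem.Chars.splitOn.go, splitAux]
  | succ n ih =>
    cases l with
    | nil => simp [PySem.Chars.splitOn.go, splitAux]
    | cons c rest =>
      rw [PySem.Chars.splitOn.go]
      by_cases hc : c = d
      · subst hc
        have hpre : List.isPrefixOf [c] (c :: rest) = true := by simp [List.isPrefixOf]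
        simp only [hpre, if_pos, List.length_cons, List.length_nil, List.drop_succ_cons, List.drop_zero]
        rw [ih rest [] (cur.reverse :: acc) (by simpa using Nat.le_of_succ_le_succ (by simpa using h))]
        simp [splitAux]
      · have hpre : List.isPrefixOf [d] (c :: rest) = false := by
          simp [List.isPrefixOf]; exact fun hdc => (hc hdc.symm).elim
        rw [if_neg (by simp [hpre])]
        rw [ih rest (c :: cur) acc (by simpa using Nat.le_of_succ_le_succ (by simpa using h))]
        simp [splitAux, hc]

def split1 (l : List Char) (d : Char) : List (List Char) := splitAux d l []

theorem splitOn_eq_split1 (l : List Char) (d : Char) :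
    PySem.Chars.splitOn l [d] = split1 l d := by
  unfold PySem.Chars.splitOn split1
  simpa using splitOn_go_eq d (l.length + 1) l [] [] (by omega)

theorem splitAux_eq_modifyHead (d : Char) (l : List Char) : ∀ cur,
    splitAux d l cur = (split1 l d).modifyHead (cur.reverse ++ ·) := by
  induction l with
  | nil => intro cur; simp [splitAux, split1]
  | cons c t ih =>
    intro cur
    by_cases hc : c = d
    · subst hc
      rw [splitAux, if_pos rfl]
      rw [show split1 (c :: t) c = [] :: split1 t c by rw [split1, splitAux, if_pos rfl]; simp [split1]]
      simp [split1]
    · simp only [splitAux, split1, if_neg hc, ih (c :: cur), ih [c],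
        List.modifyHead_modifyHead]
      congr 1
      funext x
      simp [Function.comp]
  
theorem split1_cons (c : Char) (l : List Char) (d : Char) :
    split1 (c :: l) d = if c = d then [] :: split1 l d else (split1 l d).modifyHead (c :: ·) := by
  by_cases hc : c = d
  · subst hc; simp [split1, splitAux]
  · simp only [split1, splitAux, if_neg hc]
    simpa using splitAux_eq_modifyHead d l [c]

theorem split1_ne_nil (l : List Char) (d : Char) : split1 l d ≠ [] := by
  induction l with
  | nil => simp [split1, splitAux]
  | cons c t ih =>
    rw [split1_cons]
    split_ifs
    · simp
    · cases h : split1 t d <;> simp_all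

theorem find_go_shift (sub : List Char) (hsub : sub ≠ []) (t : List Char) : ∀ (k : Nat),
    PySem.Chars.find.go sub t k =
      if PySem.Chars.find.go sub t 0 = -1 then -1 else PySem.Chars.find.go sub t 0 + k := by
  induction t with
  | nil =>
    intro k
    simp [PySem.Chars.find.go, List.isEmpty_iff, hsub]
  | cons c t ih =>
    intro k
    by_cases hp : sub.isPrefixOf (c :: t) = true
    · simp only [PySem.Chars.find.go, hp, if_pos]
      simp
    · simp only [PySem.Chars.find.go, hp, if_false, Bool.false_eq_true]
      rw [ih (k + 1), ih 1]
      by_cases h0 : PySem.Chars.find.go sub t 0 = -1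
      · simp [h0]
      · have hge : -1 ≤ PySem.Chars.find.go sub t 0 := PySem.Chars.neg_one_le_find t sub
        rw [if_neg h0, if_neg h0]
        rw [if_neg (by omega)]
        omega

theorem find_cons (c : Char) (t : List Char) :
    PySem.Chars.find (c :: t) ['('] =
      if c = '(' then 0
      else if PySem.Chars.find t ['('] = -1 then -1 else PySem.Chars.find t ['('] + 1 := by
  unfold PySem.Chars.find
  by_cases hc : c = '('
  · subst hc
    simp only [PySem.Chars.find.go]
    rw [if_pos (by simp [List.isPrefixOf])]
    simp
  · rw [show PySem.Chars.find.go ['('] (c :: t) 0 = PySem.Chars.find.go ['('] t 1 by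
      simp only [PySem.Chars.find.go]
      rw [if_neg (by simp [List.isPrefixOf]; exact fun h => (hc h.symm).elim)]]
    rw [if_neg hc, find_go_shift ['('] (by simp) t 1]
    norm_num

theorem trunc_eq_takeWhile (t : List Char) :
    (if 0 ≤ PySem.Chars.find t ['('] then PySem.List.slice t none (some (PySem.Chars.find t ['('])) else t)
      = t.takeWhile (fun c => c ≠ '(') := by
  induction t with
  | nil =>
    have : PySem.Chars.find [] ['('] = -1 := by
      unfold PySem.Chars.find
      simp [PySem.Chars.find.go]
    simp [this]
  | cons c t ih =>
    rw [find_cons]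
    by_cases hc : c = '('
    · subst hc
      rw [if_pos rfl, if_pos (by omega)]
      rw [PySem.List.slice_to _ (by omega)]
      simp
    · rw [if_neg hc]
      by_cases h0 : PySem.Chars.find t ['('] = -1
      · rw [if_pos h0, if_neg (by omega)]
        rw [if_neg (by rw [h0]; omega)] at ih
        simp only [ne_eq, decide_not] at ih
        simp [hc, decide_not, ← ih]
      · have hge : -1 ≤ PySem.Chars.find t ['('] := PySem.Chars.neg_one_le_find t ['(']
        rw [if_neg h0, if_pos (by omega), PySem.List.slice_to _ (by omega)]
        rw [if_pos (by omega), PySem.List.slice_to _ (by omega)] at ih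
        rw [show (PySem.Chars.find t ['('] + 1).toNat = (PySem.Chars.find t ['(']).toNat + 1 by omega]
        simp only [ne_eq, decide_not] at ih
        simp [hc, decide_not, ← ih]

def proc (t : List Char) : List Char := PySem.Chars.strip (t.takeWhile (fun c => c ≠ '('))

theorem isspace_ne (c : Char) (h : PySem.Chars.isspace c = true) : c ≠ '(' ∧ c ≠ '|' ∧ c ≠ ',' := by
  refine ⟨?_, ?_, ?_⟩ <;> rintro rfl <;> simp [PySem.Chars.isspace] at h

theorem lstrip_space_prefix (ws y : List Char) (h : ∀ c ∈ ws, PySem.Chars.isspace c = true) :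
    PySem.Chars.lstrip (ws ++ y) = PySem.Chars.lstrip y := by
  unfold PySem.Chars.lstrip
  rw [List.dropWhile_append]
  rw [if_pos]
  simp [List.dropWhile_eq_nil_iff]
  exact fun c hc => h c hc

theorem strip_space_prefix (ws y : List Char) (h : ∀ c ∈ ws, PySem.Chars.isspace c = true) :
    PySem.Chars.strip (ws ++ y) = PySem.Chars.strip y := by
  unfold PySem.Chars.strip
  rw [lstrip_space_prefix ws y h]

theorem rstrip_space_suffix (y sp : List Char) (h : ∀ c ∈ sp, PySem.Chars.isspace c = true) :
    PySem.Chars.rstrip (y ++ sp) = PySem.Chars.rstrip y := by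
  unfold PySem.Chars.rstrip
  rw [List.reverse_append, List.dropWhile_append, if_pos]
  simp [List.dropWhile_eq_nil_iff]
  exact fun c hc => h c (by simpa using hc)

theorem strip_space_suffix (y sp : List Char) (h : ∀ c ∈ sp, PySem.Chars.isspace c = true) :
    PySem.Chars.strip (y ++ sp) = PySem.Chars.strip y := by
  unfold PySem.Chars.strip PySem.Chars.lstrip
  rw [List.dropWhile_append]
  by_cases hy : (List.dropWhile PySem.Chars.isspace y).isEmpty = true
  · rw [if_pos hy]
    simp only [List.isEmpty_iff] at hy
    rw [hy]
    have hsp : List.dropWhile PySem.Chars.isspace sp = [] := by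
      simp [List.dropWhile_eq_nil_iff]
      exact fun c hc => h c hc
    rw [hsp]
  · rw [if_neg hy]
    exact rstrip_space_suffix _ sp h

theorem proc_space_prefix (ws y : List Char) (h : ∀ c ∈ ws, PySem.Chars.isspace c = true) :
    proc (ws ++ y) = proc y := by
  unfold proc
  rw [List.takeWhile_append, if_pos, strip_space_prefix ws _ h]
  have : List.takeWhile (fun c => decide (c ≠ '(')) ws = ws := by
    rw [List.takeWhile_eq_self_iff]
    exact fun c hc => by simpa using (isspace_ne c (h c hc)).1
  rw [this]

theorem proc_space_suffix (y ws : List Char) (h : ∀ c ∈ ws, PySem.Chars.isspace c = true) :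
    proc (y ++ ws) = proc y := by
  unfold proc
  rw [List.takeWhile_append]
  by_cases hy : (List.takeWhile (fun c => decide (c ≠ '(')) y).length = y.length
  · rw [if_pos hy]
    have hy' : List.takeWhile (fun c => decide (c ≠ '(')) y = y := by
      exact List.IsPrefix.eq_of_length (List.takeWhile_prefix _) hy
    rw [hy']
    exact strip_space_suffix y _ (fun c hc => h c (List.takeWhile_subset _ hc))
  · rw [if_neg hy]

theorem split1_nodelim_prefix (ws : List Char) : ∀ (x : List Char) (d : Char), (∀ c ∈ ws, c ≠ d) →
    split1 (ws ++ x) d = (split1 x d).modifyHead (ws ++ ·) := by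
  induction ws with
  | nil =>
    intro x d _
    simp only [List.nil_append]
    rw [show (fun x : List Char => x) = id from rfl, List.modifyHead_id]
    rfl
  | cons c w ih =>
    intro x d h
    rw [List.cons_append, split1_cons, if_neg (h c (by simp)), ih x d (fun a ha => h a (by simp [ha]))]
    rw [List.modifyHead_modifyHead]
    rfl

theorem split1_nodelim_suffix : ∀ (x ws : List Char) (d : Char), (∀ c ∈ ws, c ≠ d) →
    split1 (x ++ ws) d = (split1 x d).dropLast ++ [(split1 x d).getLastD [] ++ ws] := by
  intro x
  induction x with
  | nil =>
    intro ws d h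
    rw [List.nil_append, show split1 ws d = split1 (ws ++ []) d by simp,
      split1_nodelim_prefix ws [] d h]
    simp [split1, splitAux]
  | cons c x ih =>
    intro ws d h
    rw [List.cons_append, split1_cons, split1_cons, ih ws d h]
    have hne := split1_ne_nil x d
    by_cases hc : c = d
    · rw [if_pos hc, if_pos hc]
      cases hS : split1 x d with
      | nil => exact absurd hS hne
      | cons a T => simp
    · rw [if_neg hc, if_neg hc]
      cases hS : split1 x d with
      | nil => exact absurd hS hne
      | cons a T =>
        cases T with
        | nil => simp
        | cons b T' => simp

theorem mapProc_modifyHead_ws (ws : List Char) (L : List (List Char))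
    (h : ∀ c ∈ ws, PySem.Chars.isspace c = true) :
    (L.modifyHead (ws ++ ·)).map proc = L.map proc := by
  cases L with
  | nil => rfl
  | cons a T => simp [proc_space_prefix ws a h]

theorem mapProc_split1_lstrip (con : List Char) :
    (split1 (PySem.Chars.lstrip con) '|').map proc = (split1 con '|').map proc := by
  have hsplit : con = con.takeWhile PySem.Chars.isspace ++ PySem.Chars.lstrip con := by
    rw [PySem.Chars.lstrip, List.takeWhile_append_dropWhile]
  have hws : ∀ c ∈ con.takeWhile PySem.Chars.isspace, PySem.Chars.isspace c = true :=
    fun c hc => List.mem_takeWhile_imp hc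
  conv_rhs => rw [hsplit]
  rw [split1_nodelim_prefix _ _ _ (fun c hc => (isspace_ne c (hws c hc)).2.1)]
  rw [mapProc_modifyHead_ws _ _ hws]

theorem mapProc_split1_rstrip (con : List Char) :
    (split1 (PySem.Chars.rstrip con) '|').map proc = (split1 con '|').map proc := by
  have hsplit : con = PySem.Chars.rstrip con ++ (con.reverse.takeWhile PySem.Chars.isspace).reverse := by
    rw [PySem.Chars.rstrip]
    calc con = con.reverse.reverse := by simp
      _ = (List.takeWhile PySem.Chars.isspace con.reverse ++ List.dropWhile PySem.Chars.isspace con.reverse).reverse := by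
            rw [List.takeWhile_append_dropWhile]
      _ = (List.dropWhile PySem.Chars.isspace con.reverse).reverse ++ (List.takeWhile PySem.Chars.isspace con.reverse).reverse := by
            rw [List.reverse_append]
  have hws : ∀ c ∈ (con.reverse.takeWhile PySem.Chars.isspace).reverse, PySem.Chars.isspace c = true :=
    fun c hc => List.mem_takeWhile_imp (by simpa using hc)
  conv_rhs => rw [hsplit]
  rw [split1_nodelim_suffix _ _ _ (fun c hc => (isspace_ne c (hws c hc)).2.1)]
  have hne := split1_ne_nil (PySem.Chars.rstrip con) '|'
  set S := split1 (PySem.Chars.rstrip con) '|' with hS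
  conv_lhs => rw [show S = S.dropLast ++ [S.getLastD []] by
    rw [List.getLastD_eq_getLast?, List.getLast?_eq_some_getLast hne]
    simp [List.dropLast_append_getLast hne]]
  rw [List.map_append, List.map_append]
  congr 1
  simp [proc_space_suffix _ _ hws]

theorem mapProc_split1_strip (con : List Char) :
    (split1 (PySem.Chars.strip con) '|').map proc = (split1 con '|').map proc := by
  rw [PySem.Chars.strip, mapProc_split1_rstrip, mapProc_split1_lstrip]

def toks : List Char → List (List Char)
  | [] => [[]]
  | c :: l => if c = ',' ∨ c = '|' then [] :: toks l else (toks l).modifyHead (c :: ·)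

theorem flatten_split (l : List Char) :
    (split1 l ',').flatMap (fun con => split1 con '|') = toks l := by
  induction l with
  | nil => simp [split1, splitAux, toks]
  | cons c l ih =>
    rw [split1_cons, toks]
    by_cases hcomma : c = ','
    · rw [if_pos hcomma, if_pos (Or.inl hcomma)]
      rw [List.flatMap_cons, ← ih]
      simp [split1, splitAux]
    · rw [if_neg hcomma]
      cases hS : split1 l ',' with
      | nil => exact absurd hS (split1_ne_nil l ',')
      | cons a T =>
        rw [List.modifyHead_cons, List.flatMap_cons, split1_cons]
        by_cases hpipe : c = '|'
        · rw [if_pos hpipe, if_pos (Or.inr hpipe), ← ih, hS, List.flatMap_cons]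
          simp
        · rw [if_neg hpipe, if_neg (by simp [hcomma, hpipe]), ← ih, hS, List.flatMap_cons]
          cases hA : split1 a '|' with
          | nil => exact absurd hA (split1_ne_nil a '|')
          | cons b U => simp

def innerStepC (a : List (List Char)) (dis : List Char) : List (List Char) :=
  if PySem.Chars.strip (if 0 ≤ PySem.Chars.find dis ['('] then PySem.List.slice dis none (some (PySem.Chars.find dis ['('])) else dis) ≠ []
  then a ++ [PySem.Chars.strip (if 0 ≤ PySem.Chars.find dis ['('] then PySem.List.slice dis none (some (PySem.Chars.find dis ['('])) else dis)]
  else a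

def charF (a : List (List Char)) (con : List Char) : List (List Char) :=
  (PySem.Chars.splitOn (PySem.Chars.strip con) ['|']).foldl innerStepC a

theorem split?_getD_toList (s sep : String) (h : sep.toList ≠ []) :
    ((PySem.Str.split? s sep).getD []).map String.toList = PySem.Chars.splitOn s.toList sep.toList := by
  have hb := PySem.Str.split?_map s sep
  rw [PySem.Chars.split?, if_neg (by simpa [List.isEmpty_iff] using h)] at hb
  cases hq : PySem.Str.split? s sep with
  | none => rw [hq] at hb; simp at hb
  | some L => rw [hq] at hb; simpa using hb

theorem str_ne_empty (p : String) : (p ≠ "") ↔ p.toList ≠ [] := by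
  constructor
  · intro h hc
    exact h (String.toList_inj.mp (by simp [hc]))
  · intro h hc
    exact h (by simp [hc])

theorem paren_toList : ("(" : String).toList = ['('] := by decide

theorem step_toList (acc : List String) (dis : String) :
    (List.map String.toList
      (let i := PySem.Str.find dis "("
       let dis' := if 0 ≤ i then PySem.Str.slice dis none (some i) else dis
       let pkg := PySem.Str.strip dis'
       if pkg ≠ "" then acc ++ [pkg] else acc))
      = innerStepC (acc.map String.toList) dis.toList := by
  simp only [innerStepC, PySem.Str.find_eq, paren_toList]
  by_cases hi : 0 ≤ PySem.Chars.find dis.toList ['(']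
  · simp only [if_pos hi]
    have hp := str_ne_empty (PySem.Str.strip (PySem.Str.slice dis none (some (PySem.Chars.find dis.toList ['(']))))
    rw [PySem.Str.toList_strip, PySem.Str.toList_slice] at hp
    by_cases hq : PySem.Chars.strip (PySem.Chars.slice dis.toList none (some (PySem.Chars.find dis.toList ['(']))) ≠ []
    · rw [if_pos (hp.mpr (by simpa using hq)), if_pos (by simpa using hq)]
      simp [PySem.Str.toList_strip, PySem.Str.toList_slice]
    · rw [if_neg (fun hx => hq (by simpa using hp.mp hx)), if_neg (by simpa using hq)]
  · simp only [if_neg hi]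
    have hp := str_ne_empty (PySem.Str.strip dis)
    rw [PySem.Str.toList_strip] at hp
    by_cases hq : PySem.Chars.strip dis.toList ≠ []
    · rw [if_pos (hp.mpr hq), if_pos hq]
      simp [PySem.Str.toList_strip]
    · rw [if_neg (fun hx => hq (hp.mp hx)), if_neg hq]

theorem foldl_inner (L : List String) : ∀ (acc : List String),
    (L.foldl (fun acc dis =>
        let i := PySem.Str.find dis "("
        let dis := if 0 ≤ i then PySem.Str.slice dis none (some i) else dis
        let pkg := PySem.Str.strip dis
        if pkg ≠ "" then acc ++ [pkg] else acc) acc).map String.toList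
      = (L.map String.toList).foldl innerStepC (acc.map String.toList) := by
  induction L with
  | nil => intro acc; simp
  | cons dis L ih =>
    intro acc
    rw [List.foldl_cons, List.map_cons, List.foldl_cons]
    rw [show innerStepC (List.map String.toList acc) dis.toList
          = List.map String.toList
              (let i := PySem.Str.find dis "("
               let dis' := if 0 ≤ i then PySem.Str.slice dis none (some i) else dis
               let pkg := PySem.Str.strip dis'
               if pkg ≠ "" then acc ++ [pkg] else acc) from (step_toList acc dis).symm]
    exact ih _

def emit (L : List (List Char)) : List String :=
  ((L.map proc).filter (fun t => t ≠ [])).map String.ofList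

theorem pipe_toList : ("|" : String).toList = ['|'] := by decide
theorem comma_toList : ("," : String).toList = [','] := by decide

theorem foldl_outer (L : List String) : ∀ (acc : List String),
    (L.foldl (fun acc con =>
        let con := PySem.Str.strip con
        ((PySem.Str.split? con "|").getD []).foldl (fun acc dis =>
          let i := PySem.Str.find dis "("
          let dis := if 0 ≤ i then PySem.Str.slice dis none (some i) else dis
          let pkg := PySem.Str.strip dis
          if pkg ≠ "" then acc ++ [pkg] else acc) acc) acc).map String.toList
      = (L.map String.toList).foldl charF (acc.map String.toList) := by
  induction L with
  | nil => intro acc; simp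
  | cons con L ih =>
    intro acc
    rw [List.foldl_cons, List.map_cons, List.foldl_cons]
    rw [show charF (List.map String.toList acc) con.toList
          = List.map String.toList
              (let con' := PySem.Str.strip con
               ((PySem.Str.split? con' "|").getD []).foldl (fun acc dis =>
                 let i := PySem.Str.find dis "("
                 let dis := if 0 ≤ i then PySem.Str.slice dis none (some i) else dis
                 let pkg := PySem.Str.strip dis
                 if pkg ≠ "" then acc ++ [pkg] else acc) acc) from by
      show charF _ _ = _
      rw [foldl_inner]
      unfold charF
      rw [split?_getD_toList _ _ (by rw [pipe_toList]; simp), pipe_toList, PySem.Str.toList_strip]]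
    exact ih _

theorem innerStepC_eq (a : List (List Char)) (dis : List Char) :
    innerStepC a dis = if proc dis ≠ [] then a ++ [proc dis] else a := by
  unfold innerStepC proc
  rw [trunc_eq_takeWhile]

theorem foldl_proc (M : List (List Char)) : ∀ (a : List (List Char)),
    M.foldl innerStepC a = a ++ (M.map proc).filter (fun t => t ≠ []) := by
  induction M with
  | nil => intro a; simp
  | cons dis M ih =>
    intro a
    rw [List.foldl_cons, innerStepC_eq, ih]
    by_cases h : proc dis ≠ []
    · rw [if_pos h]
      simp [h]
    · rw [if_neg h]
      simp only [ne_eq, Decidable.not_not] at h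
      simp [h]

theorem charF_eq (a : List (List Char)) (con : List Char) :
    charF a con = a ++ ((split1 con '|').map proc).filter (fun t => t ≠ []) := by
  unfold charF
  rw [splitOn_eq_split1, foldl_proc, mapProc_split1_strip]

theorem char_pipeline (l : List Char) :
    (PySem.Chars.splitOn l [',']).foldl charF [] = ((toks l).map proc).filter (fun t => t ≠ []) := by
  rw [splitOn_eq_split1]
  have key : ∀ (M : List (List Char)) (a : List (List Char)), M.foldl charF a = a ++ (M.flatMap (fun con => ((split1 con '|').map proc).filter (fun t => t ≠ []))) := by
    intro M
    induction M with
    | nil => intro a; simp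
    | cons con M ih => intro a; rw [List.foldl_cons, charF_eq, ih]; simp
  rw [key, List.nil_append]
  rw [← List.filter_flatMap, ← List.map_flatMap, flatten_split]

theorem portA_eq_emit (s : String) : split_field_py s = emit (toks s.toList) := by
  have h1 : (split_field_py s).map String.toList = ((toks s.toList).map proc).filter (fun t => t ≠ []) := by
    unfold split_field_py
    rw [foldl_outer, List.map_nil, split?_getD_toList _ _ (by rw [comma_toList]; simp), comma_toList,
      char_pipeline]
  calc split_field_py s = ((split_field_py s).map String.toList).map String.ofList := by
        simp [List.map_map, Function.comp_def]
    _ = emit (toks s.toList) := by rw [h1]; rfl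

theorem takeWhile_no_paren (tok : List Char) (h : '(' ∉ tok) :
    List.takeWhile (fun c => decide (c ≠ '(')) tok = tok := by
  rw [List.takeWhile_eq_self_iff]
  intro c hc
  have : c ≠ '(' := fun hce => h (hce ▸ hc)
  simpa using this

theorem proc_no_paren (tok : List Char) (h : '(' ∉ tok) :
    proc tok = PySem.Chars.strip tok := by
  unfold proc
  rw [takeWhile_no_paren _ h]

theorem proc_paren (tok rest : List Char) (h : '(' ∉ tok) :
    proc (tok ++ '(' :: rest) = PySem.Chars.strip tok := by
  unfold proc
  rw [List.takeWhile_append, if_pos (by rw [takeWhile_no_paren _ h])]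
  rw [List.takeWhile_cons_of_neg (by simp), List.append_nil]

theorem modifyHead_id' (T : List (List Char)) : List.modifyHead (fun h => h) T = T := by
  cases T <;> simp

theorem emit_cons (h : List Char) (T : List (List Char)) :
    emit (h :: T) = (if proc h ≠ [] then [String.ofList (proc h)] else []) ++ emit T := by
  unfold emit
  rw [List.map_cons, List.filter_cons]
  by_cases hp : proc h ≠ []
  · rw [if_pos hp, if_pos (by simpa using hp)]
    simp
  · rw [if_neg hp, if_neg (by simpa using hp)]
    simp

theorem emit_modifyHead_congr (f g : List Char → List Char) (T : List (List Char))
    (h : ∀ x, proc (f x) = proc (g x)) :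
    emit (T.modifyHead f) = emit (T.modifyHead g) := by
  cases T with
  | nil => rfl
  | cons a T => rw [List.modifyHead_cons, List.modifyHead_cons, emit_cons, emit_cons, h a]

theorem portB_invariant (l : List Char) : ∀ (out : List String) (tok : List Char) (skip : Bool),
    '(' ∉ tok →
    (fun st : List String × List Char × Bool => pvFlush st.1 st.2.1) (l.foldl pvStep (out, tok, skip)) =
      out ++ emit ((toks l).modifyHead (fun h => tok ++ (if skip then '(' :: h else h))) := by
  induction l with
  | nil =>
    intro out tok skip htok
    simp only [List.foldl_nil, toks, List.modifyHead_cons, emit_cons]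
    have hproc : proc (tok ++ (if skip then '(' :: ([] : List Char) else [])) = PySem.Chars.strip tok := by
      cases skip
      · simpa using proc_no_paren tok htok
      · simpa using proc_paren tok [] htok
    rw [hproc]
    unfold pvFlush
    by_cases hs : PySem.Chars.strip tok ≠ []
    · rw [if_pos hs, if_pos hs]; simp [emit]
    · rw [if_neg hs, if_neg hs]; simp [emit]
  | cons ch l ih =>
    intro out tok skip htok
    rw [List.foldl_cons]
    by_cases hd : ch = ',' ∨ ch = '|'
    · rw [show pvStep (out, tok, skip) ch = (pvFlush out tok, [], false) from by
        unfold pvStep; rw [if_pos hd]]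
      rw [ih (pvFlush out tok) [] false (by simp)]
      rw [show toks (ch :: l) = [] :: toks l from by rw [toks, if_pos hd]]
      rw [List.modifyHead_cons, emit_cons]
      have hproc : proc (tok ++ (if skip then '(' :: ([] : List Char) else [])) = PySem.Chars.strip tok := by
        cases skip
        · simpa using proc_no_paren tok htok
        · simpa using proc_paren tok [] htok
      simp only [hproc]
      unfold pvFlush
      by_cases hs : PySem.Chars.strip tok ≠ []
      · rw [if_pos hs, if_pos hs]
        cases skip <;> simp [modifyHead_id']
      · rw [if_neg hs, if_neg hs]
        cases skip <;> simp [modifyHead_id']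
    · have hnd : ¬(ch = ',' ∨ ch = '|') := hd
      rw [show toks (ch :: l) = (toks l).modifyHead (ch :: ·) from by rw [toks, if_neg hnd]]
      by_cases hpar : ch = '('
      · subst hpar
        rw [show pvStep (out, tok, skip) '(' = (out, tok, true) from by
          unfold pvStep; rw [if_neg hnd, if_pos rfl]]
        rw [ih out tok true htok, List.modifyHead_modifyHead]
        congr 1
        apply emit_modifyHead_congr
        intro x
        simp only [Function.comp, if_pos]
        cases skip
        · simp [proc_paren tok x htok]
        · simp only [if_true]
          rw [proc_paren tok x htok, proc_paren tok ('(' :: x) htok]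
      · rw [show pvStep (out, tok, skip) ch = (if skip then (out, tok, skip) else (out, tok ++ [ch], skip)) from by
          unfold pvStep; rw [if_neg hnd, if_neg hpar]]
        cases skip
        · rw [if_neg (by simp)]
          rw [ih out (tok ++ [ch]) false (by simp [htok]; exact fun h => hpar h.symm)]
          rw [List.modifyHead_modifyHead]
          have hfg : ((fun h => tok ++ if false = true then '(' :: h else h) ∘ fun x : List Char => ch :: x)
              = (fun h : List Char => tok ++ [ch] ++ if false = true then '(' :: h else h) := by
            funext x; simp [Function.comp]
          rw [hfg]
        · rw [if_pos rfl]
          rw [ih out tok true htok, List.modifyHead_modifyHead]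
          congr 1
          apply emit_modifyHead_congr
          intro x
          simp only [Function.comp, if_pos]
          simp [proc_paren tok x htok, proc_paren tok (ch :: x) htok]

theorem portB_eq_emit (s : String) : split_field_py_alt s = emit (toks s.toList) := by
  unfold split_field_py_alt
  rw [show (let st := s.toList.foldl pvStep ([], [], false); pvFlush st.1 st.2.1)
        = (fun st : List String × List Char × Bool => pvFlush st.1 st.2.1) (s.toList.foldl pvStep ([], [], false)) from rfl]
  rw [portB_invariant s.toList [] [] false (by simp)]
  rw [show (fun h : List Char => ([] : List Char) ++ (if false then '(' :: h else h)) = id from by funext h; simp]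
  rw [List.modifyHead_id]
  rfl

-- ===== VERDICT (by name: the statement is the Claim_ definition above) =====
theorem split_field_py_spec : Claim_equal_split_field_py := by
  intro s _
  unfold Spec_split_field_py
  rw [portA_eq_emit, portB_eq_emit]
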